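-- pv_equiv track=rewrite | github.com/MarkZH/Genetic_Chess | analysis/delete_comments.py | delete_comments
-- ===== SOURCE A (Python) =====
-- def remove_nested_parentheses(line: str) -> str:
--     depth = 0
--     for index, character in enumerate(line):
--         if character == ')':
--             if depth == 0:
--                 raise RuntimeError(f"Parentheses do not match: {line}")
--
--             depth -= 1
--             if depth == 0:
--                 return remove_nested_parentheses(line[:opening_index] + line[index + 1:])
--         elif character == '(':
--             if depth == 0:
--                 opening_index = index
--             depth += 1
--
--     return ' '.join(line.split())
--
-- def delete_comments(line: str) -> str:
--     comment_index = len(line)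
--     for comment_opener in ";{":
--         index = line.find(comment_opener)
--         if index >= 0:
--             comment_index = min(comment_index, index)
--
--     if comment_index == len(line):
--         return remove_nested_parentheses(line)
--
--     if line[comment_index] == ';':
--         return delete_comments(line[:comment_index])
--     else:
--         comment_closer_index = line.find('}', comment_index + 1)
--         return delete_comments(line[:comment_index] + line[comment_closer_index + 1:])
-- ===== SOURCE B (Python) =====
-- def delete_comments(line: str) -> str:
--     # one linear pass: strip ';' and '{...}' comments and complete top-level
--     # parenthesized groups while tracking depth; then normalize whitespace
--     out = []
--     in_comment = False
--     depth = 0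
--     start = 0  # index in out where the current outermost '(' group began
--     for ch in line:
--         if in_comment:
--             if ch == '}':
--                 in_comment = False
--         elif ch == ';':
--             break
--         elif ch == '{':
--             in_comment = True
--         elif ch == '(':
--             if depth == 0:
--                 start = len(out)
--             depth += 1
--             out.append(ch)
--         elif ch == ')':
--             if depth > 0:
--                 depth -= 1
--                 if depth == 0:
--                     del out[start:]
--                 else:
--                     out.append(ch)
--             else:
--                 out.append(ch)
--         else:
--             out.append(ch)
--     return ' '.join(''.join(out).split())
-- ===== Notes on version B (the rewrite author's own statement) =====
-- stated objective: alternative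
-- what changed: A repeatedly re-scans and splices the string (str.find + slicing + recursion for each comment and each parenthesized group); B is a single linear pass over the characters that tracks comment state and paren depth and builds the output list once (not measurably faster: A's re-scans are C-level str.find).
import Mathlib
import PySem

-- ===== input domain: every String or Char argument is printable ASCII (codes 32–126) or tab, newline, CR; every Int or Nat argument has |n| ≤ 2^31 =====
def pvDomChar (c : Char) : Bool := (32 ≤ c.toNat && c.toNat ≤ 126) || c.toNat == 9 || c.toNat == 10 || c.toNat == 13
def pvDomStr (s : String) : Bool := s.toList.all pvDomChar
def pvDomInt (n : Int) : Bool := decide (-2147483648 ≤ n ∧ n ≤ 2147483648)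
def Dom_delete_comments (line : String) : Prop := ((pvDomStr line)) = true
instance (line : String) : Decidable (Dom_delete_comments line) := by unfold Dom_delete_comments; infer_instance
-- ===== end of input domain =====

-- B replaces A's repeated find/slice/recursion passes by one linear scan over the characters
-- (comment state + paren depth) that builds the output once.

-- ===== PORT A =====
-- shared by both ports: ' '.join(s.split()) — both Python versions end with exactly this call
def wsNorm (cs : List Char) : List Char := PySem.Chars.join [' '] (PySem.Chars.split₀ cs)

-- transliteration of str.find for a single character: index of first occurrence
def pyFindCh : List Char → Char → Option Nat
  | [], _ => none
  | c :: cs, t => if c = t then some 0 else (pyFindCh cs t).map (· + 1)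

-- the for-loop of remove_nested_parentheses (enumerate(line)): carries index, depth, opening_index.
-- none = Python raises RuntimeError; some none = loop falls through; some (some (oi, i)) = early return indices
def rnpScan : List Char → Nat → Nat → Nat → Option (Option (Nat × Nat))
  | [], _, _, _ => some none
  | c :: cs, idx, depth, oi =>
    if c = ')' then
      if depth = 0 then none
      else if depth = 1 then some (some (oi, idx))
      else rnpScan cs (idx + 1) (depth - 1) oi
    else if c = '(' then
      rnpScan cs (idx + 1) (depth + 1) (if depth = 0 then idx else oi)
    else rnpScan cs (idx + 1) depth oi

-- remove_nested_parentheses; fuel only makes the Python recursion structural (each step drops ≥ 2 chars)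
def rnpFuel : Nat → List Char → List Char
  | 0, _ => []
  | fuel + 1, cs =>
    match rnpScan cs 0 0 0 with
    | none => []                 -- Python raises RuntimeError here (excluded by Pre_)
    | some none => wsNorm cs     -- return ' '.join(line.split())
    | some (some (oi, i)) => rnpFuel fuel (cs.take oi ++ cs.drop (i + 1))

-- delete_comments; fuel only makes the recursion structural (inside Pre_ every step shortens the line)
def delete_comments_core : Nat → List Char → List Char
  | 0, _ => []
  | fuel + 1, l =>
    let n := l.length
    -- the for-loop over ";{" computing comment_index, unrolled to its two iterations
    let ci := n
    let ci := match pyFindCh l ';' with | some i => min ci i | none => ci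
    let ci := match pyFindCh l '{' with | some i => min ci i | none => ci
    if ci = n then rnpFuel (n + 1) l
    else if l.getD ci ' ' = ';' then   -- line[comment_index], in range since ci < n
      delete_comments_core fuel (l.take ci)
    else
      -- line.find('}', comment_index+1), hand-ported: search in the suffix and re-offset
      match pyFindCh (l.drop (ci + 1)) '}' with
      | some j => delete_comments_core fuel (l.take ci ++ l.drop (ci + 1 + j + 1))
      | none => []                 -- comment_closer_index = -1: Python recurses without bound (excluded by Pre_)

def delete_comments (line : String) : String :=
  String.ofList (delete_comments_core (line.toList.length + 1) line.toList)

-- ===== PORT B =====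
-- the single pass of Source B: in_comment flag, paren depth, start = index in out of the outermost '('
def altLoop : List Char → Bool → Nat → Nat → List Char → List Char
  | [], _, _, _, out => out
  | c :: cs, ic, depth, start, out =>
    if ic then
      if c = '}' then altLoop cs false depth start out else altLoop cs true depth start out
    else if c = ';' then out
    else if c = '{' then altLoop cs true depth start out
    else if c = '(' then
      altLoop cs false (depth + 1) (if depth = 0 then out.length else start) (out ++ [c])
    else if c = ')' then
      if 0 < depth then
        if depth = 1 then altLoop cs false 0 start (out.take start)   -- del out[start:]
        else altLoop cs false (depth - 1) start (out ++ [c])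
      else altLoop cs false depth start (out ++ [c])
    else altLoop cs false depth start (out ++ [c])

def delete_comments_alt (line : String) : String :=
  String.ofList (wsNorm (altLoop line.toList false 0 0 []))

-- ===== PRECONDITION & SPEC =====
-- helpers for Pre_ (a parsing precondition needs a scan; these are proof-side, neither port uses them):
-- cmStrip = the comment-stripped text plus a flag "ended inside an unclosed '{' comment"
def cmStrip : List Char → Bool → List Char × Bool
  | [], ic => ([], ic)
  | c :: cs, ic =>
    if ic then
      if c = '}' then cmStrip cs false else cmStrip cs true
    else if c = ';' then ([], false)
    else if c = '{' then cmStrip cs true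
    else
      let r := cmStrip cs false
      (c :: r.1, r.2)

-- okBal cs d = no prefix of cs closes more parens than are open (starting from depth d)
def okBal : List Char → Nat → Bool
  | [], _ => true
  | c :: cs, d =>
    if c = '(' then okBal cs (d + 1)
    else if c = ')' then decide (1 ≤ d) && okBal cs (d - 1)
    else okBal cs d

-- Pre_ excludes exactly the inputs where A does not return: an unclosed '{' comment (unbounded
-- recursion) and a ')' in the comment-stripped text with no matching '(' (RuntimeError).
def Pre_delete_comments (line : String) : Prop :=
  (cmStrip line.toList false).2 = false ∧ okBal (cmStrip line.toList false).1 0 = true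
instance (line : String) : Decidable (Pre_delete_comments line) := by
  unfold Pre_delete_comments; infer_instance

def pvWitness_delete_comments : String := "move (a b) {note} x ; rest"

def Spec_delete_comments (line : String) (out : String) : Prop := out = delete_comments_alt line
instance (line : String) (out : String) : Decidable (Spec_delete_comments line out) := by
  unfold Spec_delete_comments; infer_instance

-- ===== CLAIM (what is proved, stated in full; the proofs are below) =====
def Claim_equal_delete_comments : Prop :=
  ∀ (line : String), Dom_delete_comments line → Pre_delete_comments line →
    Spec_delete_comments line (delete_comments line)

-- ===== LEMMAS AND PROOFS =====

-- ## the common reference semantics of the paren phase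
-- closeP cs d = the suffix after the ')' matching depth d, if the parens ever close
def closeP : List Char → Nat → Option (List Char)
  | [], _ => none
  | c :: cs, d =>
    if c = ')' then (if d = 1 then some cs else closeP cs (d - 1))
    else if c = '(' then closeP cs (d + 1)
    else closeP cs d

theorem closeP_length : ∀ (cs : List Char) (d : Nat) (rest : List Char),
    closeP cs d = some rest → rest.length < cs.length ∧ cs.drop (cs.length - rest.length) = rest := by
  intro cs
  induction cs with
  | nil => intro d rest h; simp [closeP] at h
  | cons c cs ih =>
    intro d rest h
    simp only [closeP] at h
    split_ifs at h with h1 h2 h3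
    · -- ')' and d = 1
      cases h
      constructor
      · simp
      · simp
    · -- ')' and d ≠ 1
      obtain ⟨hlt, hdrop⟩ := ih (d - 1) rest h
      refine ⟨by simp; omega, ?_⟩
      have h4 : cs.length + 1 - rest.length = (cs.length - rest.length) + 1 := by omega
      simp only [List.length_cons, h4, List.drop_succ_cons, hdrop]
    · obtain ⟨hlt, hdrop⟩ := ih (d + 1) rest h
      refine ⟨by simp; omega, ?_⟩
      have h4 : cs.length + 1 - rest.length = (cs.length - rest.length) + 1 := by omega
      simp only [List.length_cons, h4, List.drop_succ_cons, hdrop]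
    · obtain ⟨hlt, hdrop⟩ := ih d rest h
      refine ⟨by simp; omega, ?_⟩
      have h4 : cs.length + 1 - rest.length = (cs.length - rest.length) + 1 := by omega
      simp only [List.length_cons, h4, List.drop_succ_cons, hdrop]

-- fGrp = the text with every complete top-level (...) group removed
def fGrp : List Char → List Char
  | [] => []
  | c :: cs =>
    if h : c = '(' then
      match h2 : closeP cs 1 with
      | some rest => fGrp rest
      | none => c :: cs
    else c :: fGrp cs
termination_by cs => cs.length
decreasing_by
  · exact Nat.lt_succ_of_lt (closeP_length cs 1 rest h2).1
  · simp

theorem okBal_close : ∀ (cs : List Char) (d : Nat) (rest : List Char), okBal cs d = true →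
    closeP cs d = some rest → okBal rest 0 = true := by
  intro cs
  induction cs with
  | nil => intro d rest _ h; simp [closeP] at h
  | cons c cs ih =>
    intro d rest hb h
    by_cases h1 : c = ')'
    · subst h1
      rw [show closeP (')' :: cs) d = (if d = 1 then some cs else closeP cs (d - 1)) from by
        simp [closeP]] at h
      simp [okBal] at hb
      by_cases h2 : d = 1
      · subst h2
        simp at h
        subst h
        simpa using hb.2
      · rw [if_neg h2] at h
        exact ih _ _ hb.2 h
    · by_cases h3 : c = '('
      · subst h3
        simp [closeP] at h
        simp [okBal] at hb
        exact ih _ _ hb h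
      · simp [closeP, h1, h3] at h
        simp [okBal, h1, h3] at hb
        exact ih _ _ hb h

-- equation lemmas for fGrp
theorem fGrp_open {cs rest : List Char} (h : closeP cs 1 = some rest) :
    fGrp ('(' :: cs) = fGrp rest := by
  rw [fGrp]
  rw [dif_pos rfl]
  split
  next r hr => rw [h] at hr; injection hr with hh; rw [hh]
  next hr => rw [h] at hr; simp at hr

theorem fGrp_open_none {cs : List Char} (h : closeP cs 1 = none) :
    fGrp ('(' :: cs) = '(' :: cs := by
  rw [fGrp]
  rw [dif_pos rfl]
  split
  next r hr => rw [h] at hr; simp at hr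
  next hr => rfl

theorem fGrp_other {c : Char} {cs : List Char} (h : c ≠ '(') :
    fGrp (c :: cs) = c :: fGrp cs := by
  rw [fGrp]
  rw [dif_neg h]

-- the paren-only pass (the single pass of Source B after comment handling); proof-side reference
def pLoop : List Char → Nat → Nat → List Char → List Char
  | [], _, _, out => out
  | c :: cs, d, start, out =>
    if c = '(' then pLoop cs (d + 1) (if d = 0 then out.length else start) (out ++ [c])
    else if c = ')' then
      if 0 < d then
        if d = 1 then pLoop cs 0 start (out.take start)
        else pLoop cs (d - 1) start (out ++ [c])
      else pLoop cs d start (out ++ [c])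
    else pLoop cs d start (out ++ [c])

-- B's pass factors through the comment-stripped text
theorem altLoop_eq_pLoop : ∀ (l : List Char) (ic : Bool) (d start : Nat) (out : List Char),
    altLoop l ic d start out = pLoop (cmStrip l ic).1 d start out := by
  intro l
  induction l with
  | nil => intro ic d start out; cases ic <;> simp [altLoop, cmStrip, pLoop]
  | cons c cs ih =>
    intro ic d start out
    cases ic with
    | true => by_cases h : c = '}' <;> simp [altLoop, cmStrip, h, ih]
    | false =>
      by_cases h1 : c = ';'
      · simp [altLoop, cmStrip, h1, pLoop]
      · by_cases h2 : c = '{'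
        · simp [altLoop, cmStrip, h1, h2, ih]
        · by_cases h3 : c = '('
          · simp [altLoop, cmStrip, h1, h2, h3, ih, pLoop]
          · by_cases h4 : c = ')'
            · simp [altLoop, cmStrip, h1, h2, h3, h4, ih, pLoop]
            · simp [altLoop, cmStrip, h1, h2, h3, h4, ih, pLoop]

-- joint characterization of pLoop at depth 0 and depth ≥ 1
theorem pLoop_spec : ∀ (n : Nat) (l : List Char), l.length ≤ n →
    ((∀ start out, pLoop l 0 start out = out ++ fGrp l) ∧
     (∀ d start out, 1 ≤ d → start ≤ out.length →
        pLoop l d start out = match closeP l d with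
          | some rest => out.take start ++ fGrp rest
          | none => out ++ l)) := by
  intro n
  induction n with
  | zero =>
    intro l hl
    have : l = [] := List.eq_nil_of_length_eq_zero (Nat.le_zero.mp hl)
    subst this
    exact ⟨fun start out => by simp [pLoop, fGrp], fun d start out _ _ => by simp [pLoop, closeP]⟩
  | succ n ih =>
    intro l hl
    constructor
    · intro start out
      cases l with
      | nil => simp [pLoop, fGrp]
      | cons c cs =>
        have hcs : cs.length ≤ n := by simpa using hl
        by_cases h3 : c = '('
        · subst h3
          rw [show pLoop ('(' :: cs) 0 start out = pLoop cs 1 out.length (out ++ ['(']) from by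
            simp [pLoop]]
          rw [(ih cs hcs).2 1 out.length (out ++ ['(']) (le_refl 1) (by simp)]
          cases h2 : closeP cs 1 with
          | some rest => simp [fGrp_open h2]
          | none => simp [fGrp_open_none h2]
        · by_cases h4 : c = ')'
          · subst h4
            rw [show pLoop (')' :: cs) 0 start out = pLoop cs 0 start (out ++ [')']) from by
              simp [pLoop]]
            rw [(ih cs hcs).1, fGrp_other h3]
            simp
          · rw [show pLoop (c :: cs) 0 start out = pLoop cs 0 start (out ++ [c]) from by
              simp [pLoop, h3, h4]]
            rw [(ih cs hcs).1, fGrp_other h3]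
            simp
    · intro d start out hd hso
      cases l with
      | nil => simp [pLoop, closeP]
      | cons c cs =>
        have hcs : cs.length ≤ n := by simpa using hl
        by_cases h3 : c = '('
        · subst h3
          rw [show pLoop ('(' :: cs) d start out
                = pLoop cs (d + 1) (if d = 0 then out.length else start) (out ++ ['(']) from by
            simp [pLoop]]
          rw [if_neg (by omega : ¬ d = 0)]
          rw [show closeP ('(' :: cs) d = closeP cs (d + 1) from by simp [closeP]]
          rw [(ih cs hcs).2 (d + 1) start (out ++ ['(']) (by omega) (by simp; omega)]
          cases h2 : closeP cs (d + 1) with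
          | some rest => simp [List.take_append_of_le_length hso]
          | none => simp
        · by_cases h4 : c = ')'
          · subst h4
            by_cases hd1 : d = 1
            · subst hd1
              rw [show pLoop (')' :: cs) 1 start out = pLoop cs 0 start (out.take start) from by
                simp [pLoop]]
              rw [show closeP (')' :: cs) 1 = some cs from by simp [closeP]]
              rw [(ih cs hcs).1]
            · rw [show pLoop (')' :: cs) d start out = pLoop cs (d - 1) start (out ++ [')'])
                  from by simp [pLoop, hd1, Nat.lt_of_lt_of_le Nat.zero_lt_one hd]]
              rw [show closeP (')' :: cs) d = closeP cs (d - 1) from by simp [closeP, hd1]]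
              rw [(ih cs hcs).2 (d - 1) start (out ++ [')']) (by omega) (by simp; omega)]
              cases h2 : closeP cs (d - 1) with
              | some rest => simp [List.take_append_of_le_length hso]
              | none => simp
          · rw [show pLoop (c :: cs) d start out = pLoop cs d start (out ++ [c]) from by
              simp [pLoop, h3, h4]]
            rw [show closeP (c :: cs) d = closeP cs d from by simp [closeP, h3, h4]]
            rw [(ih cs hcs).2 d start (out ++ [c]) hd (by simp; omega)]
            cases h2 : closeP cs d with
            | some rest => simp [List.take_append_of_le_length hso]
            | none => simp

-- at depth ≥ 1 the scan of remove_nested_parentheses is closeP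
theorem rnpScan_close : ∀ (cs : List Char) (idx d oi : Nat), 1 ≤ d →
    rnpScan cs idx d oi = (match closeP cs d with
      | none => some none
      | some rest => some (some (oi, idx + (cs.length - rest.length - 1)))) := by
  intro cs
  induction cs with
  | nil => intro idx d oi _; simp [rnpScan, closeP]
  | cons c cs ih =>
    intro idx d oi hd
    by_cases h1 : c = ')'
    · subst h1
      by_cases h2 : d = 1
      · subst h2
        rw [show rnpScan (')' :: cs) idx 1 oi = some (some (oi, idx)) from by simp [rnpScan]]
        rw [show closeP (')' :: cs) 1 = some cs from by simp [closeP]]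
        simp
      · rw [show rnpScan (')' :: cs) idx d oi = rnpScan cs (idx + 1) (d - 1) oi from by
          simp [rnpScan, h2]; omega]
        rw [show closeP (')' :: cs) d = closeP cs (d - 1) from by simp [closeP, h2]]
        rw [ih (idx + 1) (d - 1) oi (by omega)]
        cases h3 : closeP cs (d - 1) with
        | none => simp
        | some rest =>
          have hlt := (closeP_length cs (d - 1) rest h3).1
          have harith : idx + 1 + (cs.length - rest.length - 1)
              = idx + (cs.length + 1 - rest.length - 1) := by omega
          simp [harith]
    · by_cases h3 : c = '('
      · subst h3
        rw [show rnpScan ('(' :: cs) idx d oi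
              = rnpScan cs (idx + 1) (d + 1) (if d = 0 then idx else oi) from by simp [rnpScan]]
        rw [if_neg (by omega : ¬ d = 0)]
        rw [show closeP ('(' :: cs) d = closeP cs (d + 1) from by simp [closeP]]
        rw [ih (idx + 1) (d + 1) oi (by omega)]
        cases h4 : closeP cs (d + 1) with
        | none => simp
        | some rest =>
          have hlt := (closeP_length cs (d + 1) rest h4).1
          have harith : idx + 1 + (cs.length - rest.length - 1)
              = idx + (cs.length + 1 - rest.length - 1) := by omega
          simp [harith]
      · rw [show rnpScan (c :: cs) idx d oi = rnpScan cs (idx + 1) d oi from by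
            simp [rnpScan, h1, h3]]
        rw [show closeP (c :: cs) d = closeP cs d from by simp [closeP, h1, h3]]
        rw [ih (idx + 1) d oi hd]
        cases h4 : closeP cs d with
        | none => simp
        | some rest =>
          have hlt := (closeP_length cs d rest h4).1
          have harith : idx + 1 + (cs.length - rest.length - 1)
              = idx + (cs.length + 1 - rest.length - 1) := by omega
          simp [harith]

-- at depth 0, on balanced input: either the loop falls through (and fGrp is the identity) or it
-- returns the first complete top-level group, whose removal preserves fGrp and balance
theorem rnpScan_top : ∀ (l : List Char) (idx oi : Nat), okBal l 0 = true →
    (rnpScan l idx 0 oi = some none ∧ fGrp l = l) ∨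
    (∃ p q, rnpScan l idx 0 oi = some (some (idx + p, idx + q)) ∧ p < q ∧ q < l.length ∧
       fGrp (l.take p ++ l.drop (q + 1)) = fGrp l ∧
       okBal (l.take p ++ l.drop (q + 1)) 0 = true) := by
  intro l
  induction l with
  | nil => intro idx oi _; left; exact ⟨by simp [rnpScan], by simp [fGrp]⟩
  | cons c cs ih =>
    intro idx oi hb
    by_cases h1 : c = ')'
    · subst h1; simp [okBal] at hb
    · by_cases h3 : c = '('
      · subst h3
        have hb' : okBal cs 1 = true := by simpa [okBal] using hb
        rw [show rnpScan ('(' :: cs) idx 0 oi = rnpScan cs (idx + 1) 1 idx from by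
          simp [rnpScan]]
        rw [rnpScan_close cs (idx + 1) 1 idx (le_refl 1)]
        cases h2 : closeP cs 1 with
        | none => left; exact ⟨by simp, fGrp_open_none h2⟩
        | some rest =>
          right
          have hcl := closeP_length cs 1 rest h2
          refine ⟨0, cs.length - rest.length, ?_, by omega,
            by simp only [List.length_cons]; omega, ?_, ?_⟩
          · have harith : idx + 1 + (cs.length - rest.length - 1)
                = idx + (cs.length - rest.length) := by omega
            simp [harith]
          · rw [show ('(' :: cs).take 0 ++ ('(' :: cs).drop (cs.length - rest.length + 1)
                  = rest from by simp [hcl.2]]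
            exact (fGrp_open h2).symm
          · rw [show ('(' :: cs).take 0 ++ ('(' :: cs).drop (cs.length - rest.length + 1)
                  = rest from by simp [hcl.2]]
            exact okBal_close cs 1 rest hb' h2
      · have hb' : okBal cs 0 = true := by simpa [okBal, h1, h3] using hb
        rw [show rnpScan (c :: cs) idx 0 oi = rnpScan cs (idx + 1) 0 oi from by
          simp [rnpScan, h1, h3]]
        rcases ih (idx + 1) oi hb' with ⟨hs, hf⟩ | ⟨p, q, hs, hpq, hq, hf, hb2⟩
        · left
          exact ⟨hs, by rw [fGrp_other h3, hf]⟩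
        · right
          refine ⟨p + 1, q + 1, ?_, by omega,
            by simp only [List.length_cons]; omega, ?_, ?_⟩
          · rw [hs]
            have h5 : idx + 1 + p = idx + (p + 1) := by omega
            have h6 : idx + 1 + q = idx + (q + 1) := by omega
            rw [h5, h6]
          · rw [show (c :: cs).take (p + 1) ++ (c :: cs).drop (q + 1 + 1)
                  = c :: (cs.take p ++ cs.drop (q + 1)) from by simp]
            rw [fGrp_other h3, fGrp_other h3, hf]
          · rw [show (c :: cs).take (p + 1) ++ (c :: cs).drop (q + 1 + 1)
                  = c :: (cs.take p ++ cs.drop (q + 1)) from by simp]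
            simpa [okBal, h1, h3] using hb2

-- the whole of remove_nested_parentheses computes ' '.join on fGrp
theorem rnpFuel_eq : ∀ (fuel : Nat) (l : List Char), l.length < fuel → okBal l 0 = true →
    rnpFuel fuel l = wsNorm (fGrp l) := by
  intro fuel
  induction fuel with
  | zero => intro l hl _; omega
  | succ fuel ih =>
    intro l hl hb
    rcases rnpScan_top l 0 0 hb with ⟨hs, hf⟩ | ⟨p, q, hs, hpq, hq, hf, hb2⟩
    · rw [rnpFuel, hs, hf]
    · rw [rnpFuel]
      simp only [Nat.zero_add] at hs
      rw [hs]
      show rnpFuel fuel (l.take p ++ l.drop (q + 1)) = wsNorm (fGrp l)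
      have hlen : (l.take p ++ l.drop (q + 1)).length < fuel := by
        simp only [List.length_append, List.length_take, List.length_drop]
        omega
      rw [ih (l.take p ++ l.drop (q + 1)) hlen hb2, hf]

-- first-occurrence characterization of the find transliteration
theorem findCh_spec : ∀ (l : List Char) (t : Char) (i : Nat), pyFindCh l t = some i →
    i < l.length ∧ l.take i ++ t :: l.drop (i + 1) = l ∧ t ∉ l.take i := by
  intro l
  induction l with
  | nil => intro t i h; simp [pyFindCh] at h
  | cons c cs ih =>
    intro t i h
    by_cases h1 : c = t
    · subst h1
      simp [pyFindCh] at h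
      subst h
      simp
    · simp only [pyFindCh, if_neg h1] at h
      cases h2 : pyFindCh cs t with
      | none => rw [h2] at h; simp at h
      | some j =>
        rw [h2] at h
        simp at h
        obtain ⟨hj, hdec, hmem⟩ := ih t j h2
        subst h
        refine ⟨by simp; omega, by simpa using hdec, ?_⟩
        simp only [List.take_succ_cons, List.mem_cons]
        rintro (h | h)
        · exact h1 h.symm
        · exact hmem h

theorem findCh_none : ∀ (l : List Char) (t : Char), pyFindCh l t = none → t ∉ l := by
  intro l
  induction l with
  | nil => simp
  | cons c cs ih =>
    intro t h
    simp only [pyFindCh] at h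
    by_cases h1 : c = t
    · simp [h1] at h
    · rw [if_neg h1] at h
      cases h2 : pyFindCh cs t with
      | none =>
        simp only [List.mem_cons]
        rintro (h3 | h3)
        · exact h1 h3.symm
        · exact ih t h2 h3
      | some j => rw [h2] at h; simp at h

-- cmStrip over a prefix free of ';' and '{'
theorem cm_prefix : ∀ (a b : List Char), (∀ x ∈ a, x ≠ ';' ∧ x ≠ '{') →
    cmStrip (a ++ b) false = (a ++ (cmStrip b false).1, (cmStrip b false).2) := by
  intro a
  induction a with
  | nil => intro b _; simp
  | cons c a ih =>
    intro b hc
    have h1 : c ≠ ';' := (hc c (by simp)).1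
    have h2 : c ≠ '{' := (hc c (by simp)).2
    simp only [List.cons_append, cmStrip, if_neg h1, if_neg h2, Bool.false_eq_true, if_false]
    rw [ih b (fun x hx => hc x (by simp [hx]))]

theorem cm_clean : ∀ (a : List Char), (∀ x ∈ a, x ≠ ';' ∧ x ≠ '{') →
    cmStrip a false = (a, false) := by
  intro a hc
  have h := cm_prefix a [] hc
  simpa [cmStrip] using h

-- cmStrip in comment mode skips to the first '}'
theorem cm_skip : ∀ (u v : List Char), '}' ∉ u → cmStrip (u ++ '}' :: v) true = cmStrip v false := by
  intro u
  induction u with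
  | nil => intro v _; simp [cmStrip]
  | cons c u ih =>
    intro v hc
    have h1 : c ≠ '}' := by intro h; exact hc (by simp [h])
    simp only [List.cons_append, cmStrip, if_neg h1]
    exact ih v (fun h => hc (by simp [h]))

theorem cm_skip_none : ∀ (b : List Char), '}' ∉ b → cmStrip b true = ([], true) := by
  intro b
  induction b with
  | nil => intro _; simp [cmStrip]
  | cons c b ih =>
    intro hc
    have h1 : c ≠ '}' := by intro h; exact hc (by simp [h])
    simp only [cmStrip, if_neg h1]
    exact ih (fun h => hc (by simp [h]))

theorem getD_append_len : ∀ (a b : List Char) (x d : Char) (i : Nat), i = a.length →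
    (a ++ x :: b).getD i d = x := by
  intro a
  induction a with
  | nil => intro b x d i hi; subst hi; simp
  | cons c a ih =>
    intro b x d i hi
    subst hi
    simpa using ih b x d a.length rfl

theorem getD_at (l : List Char) (i : Nat) (x : Char) (hi : i < l.length)
    (h : l.take i ++ x :: l.drop (i + 1) = l) : l.getD i ' ' = x := by
  conv_lhs => rw [← h]
  exact getD_append_len _ _ _ _ _ (by simp; omega)

theorem strip_semi (l : List Char) (i : Nat)
    (hdec : l.take i ++ ';' :: l.drop (i + 1) = l)
    (hclean : ∀ x ∈ l.take i, x ≠ ';' ∧ x ≠ '{') :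
    cmStrip l false = (l.take i, false) := by
  conv_lhs => rw [← hdec]
  rw [cm_prefix _ _ hclean]
  simp [cmStrip]

theorem strip_brace (l : List Char) (k j : Nat)
    (hdec : l.take k ++ '{' :: l.drop (k + 1) = l)
    (hclean : ∀ x ∈ l.take k, x ≠ ';' ∧ x ≠ '{')
    (hdecb : (l.drop (k + 1)).take j ++ '}' :: (l.drop (k + 1)).drop (j + 1) = l.drop (k + 1))
    (hmemb : '}' ∉ (l.drop (k + 1)).take j) :
    cmStrip l false
      = (l.take k ++ (cmStrip ((l.drop (k + 1)).drop (j + 1)) false).1,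
         (cmStrip ((l.drop (k + 1)).drop (j + 1)) false).2) := by
  conv_lhs => rw [← hdec]
  rw [cm_prefix _ _ hclean]
  rw [show cmStrip ('{' :: l.drop (k + 1)) false = cmStrip (l.drop (k + 1)) true from by
    simp [cmStrip]]
  conv_lhs => rw [← hdecb]
  rw [cm_skip _ _ hmemb]

theorem strip_brace_none (l : List Char) (k : Nat)
    (hdec : l.take k ++ '{' :: l.drop (k + 1) = l)
    (hclean : ∀ x ∈ l.take k, x ≠ ';' ∧ x ≠ '{')
    (hnone : '}' ∉ l.drop (k + 1)) :
    (cmStrip l false).2 = true := by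
  conv_lhs => rw [← hdec]
  rw [cm_prefix _ _ hclean]
  rw [show cmStrip ('{' :: l.drop (k + 1)) false = cmStrip (l.drop (k + 1)) true from by
    simp [cmStrip]]
  rw [cm_skip_none _ hnone]

-- the comment phase: delete_comments reduces to remove_nested_parentheses of the stripped text
theorem core_eq : ∀ (n fuel : Nat) (l : List Char), l.length ≤ n → l.length < fuel →
    (cmStrip l false).2 = false →
    delete_comments_core fuel l
      = rnpFuel ((cmStrip l false).1.length + 1) (cmStrip l false).1 := by
  intro n
  induction n with
  | zero =>
    intro fuel l hn hf _
    have hl : l = [] := List.eq_nil_of_length_eq_zero (Nat.le_zero.mp hn)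
    subst hl
    cases fuel with
    | zero => omega
    | succ f => simp [delete_comments_core, cmStrip, pyFindCh]
  | succ n ih =>
    intro fuel l hn hf hcm
    cases fuel with
    | zero => omega
    | succ f =>
      cases hs : pyFindCh l ';' with
      | none =>
        cases hbr : pyFindCh l '{' with
        | none =>
          have hclean : ∀ x ∈ l, x ≠ ';' ∧ x ≠ '{' :=
            fun x hx => ⟨fun h => findCh_none l ';' hs (h ▸ hx),
                         fun h => findCh_none l '{' hbr (h ▸ hx)⟩
          simp only [delete_comments_core, hs, hbr]
          rw [cm_clean l hclean]
          simp
        | some k =>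
          obtain ⟨hk, hdec, hmem⟩ := findCh_spec l '{' k hbr
          have hclean : ∀ x ∈ l.take k, x ≠ ';' ∧ x ≠ '{' :=
            fun x hx => ⟨fun h => findCh_none l ';' hs (h ▸ (List.take_subset k l hx)),
                         fun h => hmem (h ▸ hx)⟩
          have hgd : l.getD k ' ' = '{' := getD_at l k '{' hk hdec
          simp only [delete_comments_core, hs, hbr]
          rw [show min l.length k = k from by omega]
          rw [if_neg (by omega : ¬ k = l.length)]
          rw [hgd, if_neg (by decide : ¬ ('{' : Char) = ';')]
          cases hbc : pyFindCh (l.drop (k + 1)) '}' with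
          | none =>
            exact absurd (strip_brace_none l k hdec hclean (findCh_none _ _ hbc)) (by simp [hcm])
          | some j =>
            obtain ⟨hj, hdecb, hmemb⟩ := findCh_spec (l.drop (k + 1)) '}' j hbc
            have hsp := strip_brace l k j hdec hclean hdecb hmemb
            have hdd : l.drop (k + 1 + j + 1) = (l.drop (k + 1)).drop (j + 1) := by
              rw [List.drop_drop]; rfl
            show delete_comments_core f (List.take k l ++ List.drop (k + 1 + j + 1) l)
                = rnpFuel ((cmStrip l false).1.length + 1) (cmStrip l false).1
            have hlen2 : (l.take k ++ l.drop (k + 1 + j + 1)).length ≤ n := by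
              simp only [List.length_append, List.length_take, List.length_drop,
                List.length_drop] at *
              omega
            have hstep := ih f (l.take k ++ l.drop (k + 1 + j + 1)) hlen2
              (by simp only [List.length_append, List.length_take, List.length_drop] at *; omega)
            rw [hdd]
            have hsp2 : cmStrip (l.take k ++ ((l.drop (k + 1)).drop (j + 1))) false
                = (l.take k ++ (cmStrip ((l.drop (k + 1)).drop (j + 1)) false).1,
                   (cmStrip ((l.drop (k + 1)).drop (j + 1)) false).2) :=
              cm_prefix _ _ hclean
            rw [hdd] at hstep
            rw [hstep (by rw [hsp2]; rw [hsp] at hcm; simpa using hcm)]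
            rw [hsp2, hsp]
      | some i =>
        obtain ⟨hi, hdec, hmem⟩ := findCh_spec l ';' i hs
        -- the ';' path, shared by the two subcases below
        have semi_path : ∀ hclean : (∀ x ∈ l.take i, x ≠ ';' ∧ x ≠ '{'),
            delete_comments_core f (l.take i)
              = rnpFuel ((cmStrip l false).1.length + 1) (cmStrip l false).1 := by
          intro hclean
          have hlen2 : (l.take i).length ≤ n := by simp; omega
          have hstep := ih f (l.take i) hlen2 (by simp; omega)
            (by rw [cm_clean _ hclean])
          rw [hstep, cm_clean _ hclean, strip_semi l i hdec hclean]
        cases hbr : pyFindCh l '{' with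
        | none =>
          have hclean : ∀ x ∈ l.take i, x ≠ ';' ∧ x ≠ '{' :=
            fun x hx => ⟨fun h => hmem (h ▸ hx),
                         fun h => findCh_none l '{' hbr (h ▸ (List.take_subset i l hx))⟩
          have hgd : l.getD i ' ' = ';' := getD_at l i ';' hi hdec
          simp only [delete_comments_core, hs, hbr]
          rw [show min l.length i = i from by omega]
          rw [if_neg (by omega : ¬ i = l.length)]
          rw [hgd, if_pos rfl]
          exact semi_path hclean
        | some k =>
          obtain ⟨hk, hdeck, hmemk⟩ := findCh_spec l '{' k hbr
          have hne : i ≠ k := by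
            intro h
            subst h
            have h1 := getD_at l i ';' hi hdec
            have h2 := getD_at l i '{' hk hdeck
            rw [h1] at h2
            exact absurd h2 (by decide)
          by_cases hik : i < k
          · -- ';' comes first
            have hclean : ∀ x ∈ l.take i, x ≠ ';' ∧ x ≠ '{' := by
              intro x hx
              refine ⟨fun h => hmem (h ▸ hx), fun h => ?_⟩
              have hsub : l.take i ⊆ l.take k := by
                intro y hy
                have hti : l.take i = (l.take k).take i := by
                  rw [List.take_take]
                  congr 1
                  omega
                exact List.take_subset i (l.take k) (hti ▸ hy)
              exact hmemk (h ▸ hsub hx)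
            have hgd : l.getD i ' ' = ';' := getD_at l i ';' hi hdec
            simp only [delete_comments_core, hs, hbr]
            rw [show min l.length i = i from by omega]
            rw [show min i k = i from by omega]
            rw [if_neg (by omega : ¬ i = l.length)]
            rw [hgd, if_pos rfl]
            exact semi_path hclean
          · -- '{' comes first
            have hki : k < i := by omega
            have hclean : ∀ x ∈ l.take k, x ≠ ';' ∧ x ≠ '{' := by
              intro x hx
              refine ⟨fun h => ?_, fun h => hmemk (h ▸ hx)⟩
              have hsub : l.take k ⊆ l.take i := by
                intro y hy
                have hti : l.take k = (l.take i).take k := by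
                  rw [List.take_take]
                  congr 1
                  omega
                exact List.take_subset k (l.take i) (hti ▸ hy)
              exact hmem (h ▸ hsub hx)
            have hgd : l.getD k ' ' = '{' := getD_at l k '{' hk hdeck
            simp only [delete_comments_core, hs, hbr]
            rw [show min l.length i = i from by omega]
            rw [show min i k = k from by omega]
            rw [if_neg (by omega : ¬ k = l.length)]
            rw [hgd, if_neg (by decide : ¬ ('{' : Char) = ';')]
            cases hbc : pyFindCh (l.drop (k + 1)) '}' with
            | none =>
              exact absurd (strip_brace_none l k hdeck hclean (findCh_none _ _ hbc))
                (by simp [hcm])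
            | some j =>
              obtain ⟨hj, hdecb, hmemb⟩ := findCh_spec (l.drop (k + 1)) '}' j hbc
              have hsp := strip_brace l k j hdeck hclean hdecb hmemb
              have hdd : l.drop (k + 1 + j + 1) = (l.drop (k + 1)).drop (j + 1) := by
                rw [List.drop_drop]; rfl
              show delete_comments_core f (List.take k l ++ List.drop (k + 1 + j + 1) l)
                  = rnpFuel ((cmStrip l false).1.length + 1) (cmStrip l false).1
              have hlen2 : (l.take k ++ l.drop (k + 1 + j + 1)).length ≤ n := by
                simp only [List.length_append, List.length_take, List.length_drop,
                  List.length_drop] at *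
                omega
              have hstep := ih f (l.take k ++ l.drop (k + 1 + j + 1)) hlen2
                (by simp only [List.length_append, List.length_take, List.length_drop] at *; omega)
              rw [hdd]
              have hsp2 : cmStrip (l.take k ++ ((l.drop (k + 1)).drop (j + 1))) false
                  = (l.take k ++ (cmStrip ((l.drop (k + 1)).drop (j + 1)) false).1,
                     (cmStrip ((l.drop (k + 1)).drop (j + 1)) false).2) :=
                cm_prefix _ _ hclean
              rw [hdd] at hstep
              rw [hstep (by rw [hsp2]; rw [hsp] at hcm; simpa using hcm)]
              rw [hsp2, hsp]

theorem delete_comments_spec : Claim_equal_delete_comments := by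
  intro line _ hpre
  unfold Spec_delete_comments delete_comments delete_comments_alt
  obtain ⟨h1, h2⟩ := hpre
  rw [core_eq line.toList.length (line.toList.length + 1) line.toList le_rfl (by omega) h1]
  rw [rnpFuel_eq _ _ (by omega) h2]
  rw [altLoop_eq_pLoop]
  rw [(pLoop_spec (cmStrip line.toList false).1.length (cmStrip line.toList false).1 le_rfl).1
    0 []]
  simp
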